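-- pv_equiv track=rewrite | github.com/Marciland/advent-of-code | 2023_python/solution/day14.py | push_east
-- ===== SOURCE A (Python) =====
-- def find_free_slot_east(row: str, start_index: int) -> int:
--     '''free_slot is where the next rock could be pushed'''
--     free_slot = start_index
--     for x_index in range(start_index, 0 - 1, -1):
--         if row[x_index] == '.':
--             break
--         free_slot -= 1
--     return free_slot
--
-- def push_east(row: str) -> str:
--     '''move all (moveable) rocks "O" as east as possible'''
--     row = list(row)
--     next_slot = find_free_slot_east(row, len(row) - 1)
--     for x_index in range(len(row) - 1, 0 - 1, -1):
--         if x_index > next_slot: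
--             continue
--         if row[x_index] == '.':
--             continue
--         if row[x_index] == 'O':
--             row[next_slot] = 'O'
--             row[x_index] = '.'
--             next_slot = find_free_slot_east(row, next_slot)
--             continue
--         if row[x_index] == '#':
--             next_slot = find_free_slot_east(row, x_index)
--             continue
--     row = ''.join(row)
--     return row
-- ===== SOURCE B (Python) =====
-- def push_east(row: str) -> str:
--     '''move all (moveable) rocks "O" as east as possible'''
--     out = []
--     for seg in row.split('#'):
--         k = seg.count('O')
--         chars = []
--         for ch in reversed(seg):
--             if ch == '.' or ch == 'O':
--                 if k > 0:
--                     chars.append('O')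
--                     k -= 1
--                 else:
--                     chars.append('.')
--             else:
--                 chars.append(ch)
--         out.append(''.join(reversed(chars)))
--     return '#'.join(out)
-- ===== Notes on version B (the rewrite author's own statement) =====
-- stated objective: alternative
-- what changed: A walks the row right-to-left repeatedly rescanning for the next free slot (find_free_slot_east after every move); B instead splits the row on the wall character, counts each segment's rocks once, and rebuilds the segment in a single right-to-left pass packing that count into its easternmost rock-or-gap cells.
import Mathlib
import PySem

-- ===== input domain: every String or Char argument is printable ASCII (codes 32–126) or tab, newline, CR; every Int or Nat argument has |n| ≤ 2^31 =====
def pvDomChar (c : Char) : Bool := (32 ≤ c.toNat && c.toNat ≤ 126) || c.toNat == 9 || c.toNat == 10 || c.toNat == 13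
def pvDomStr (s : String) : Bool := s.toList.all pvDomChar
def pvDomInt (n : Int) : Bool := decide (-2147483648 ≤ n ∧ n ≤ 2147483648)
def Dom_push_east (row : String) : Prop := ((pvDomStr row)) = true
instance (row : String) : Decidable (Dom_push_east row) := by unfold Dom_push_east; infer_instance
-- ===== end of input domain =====

-- B restructures A: instead of A's repeated rescans for the next free slot, B splits the row
-- on the wall character and rebuilds each segment in one right-to-left counting pass.

-- ===== PORT A =====

-- for x_index in range(start_index, -1, -1): if row[x_index] == '.': break; free_slot -= 1
def ffsGo (row : List Char) (free : Int) : Nat → Int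
  | 0 => free
  | i + 1 =>
    if (PySem.List.pyGet? row (i : Int)).getD ' ' = '.' then free
    else ffsGo row (free - 1) i

def find_free_slot_east (row : List Char) (start_index : Int) : Int :=
  ffsGo row start_index (start_index + 1).toNat

-- the main loop of push_east: for x_index in range(len(row)-1, -1, -1) …; fuel n ↦ x_index = n-1
def pushGo : List Char → Int → Nat → List Char × Int
  | row, next_slot, 0 => (row, next_slot)
  | row, next_slot, i + 1 =>
    if (i : Int) > next_slot then pushGo row next_slot i
    else if (PySem.List.pyGet? row (i : Int)).getD ' ' = '.' then pushGo row next_slot i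
    else if (PySem.List.pyGet? row (i : Int)).getD ' ' = 'O' then
      pushGo (PySem.List.pySetD (PySem.List.pySetD row next_slot 'O') (i : Int) '.')
        (find_free_slot_east (PySem.List.pySetD (PySem.List.pySetD row next_slot 'O') (i : Int) '.')
          next_slot) i
    else if (PySem.List.pyGet? row (i : Int)).getD ' ' = '#' then
      pushGo row (find_free_slot_east row (i : Int)) i
    else pushGo row next_slot i

def push_east (row : String) : String :=
  let l := row.toList
  String.ofList (pushGo l (find_free_slot_east l ((l.length : Int) - 1)) l.length).1

-- ===== PORT B =====

-- the inner loop of B: over reversed(seg), k 'O's still to place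
def packGo : Int → List Char → List Char
  | _, [] => []
  | k, c :: t =>
    if c = '.' ∨ c = 'O' then
      if 0 < k then 'O' :: packGo (k - 1) t else '.' :: packGo k t
    else c :: packGo k t

def packSeg (seg : List Char) : List Char :=
  (packGo ((PySem.Chars.count seg ['O'] : Int)) seg.reverse).reverse

def push_east_alt (row : String) : String :=
  String.ofList
    (PySem.Chars.join ['#'] ((PySem.Chars.splitOn row.toList ['#']).map packSeg))

-- ===== PRECONDITION & SPEC =====
def Spec_push_east (row : String) (out : String) : Prop := out = push_east_alt row
instance (row : String) (out : String) : Decidable (Spec_push_east row out) := by unfold Spec_push_east; infer_instance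

-- ===== CLAIM (what is proved, stated in full; the proofs are below) =====
def Claim_equal_push_east : Prop := ∀ (row : String), Dom_push_east row → Spec_push_east row (push_east row)

-- ===== LEMMAS AND PROOFS =====

-- rightmost index < i holding '.', else -1 (what find_free_slot_east computes)
def maxDot (l : List Char) : Nat → Int
  | 0 => -1
  | i + 1 => if l[i]?.getD ' ' = '.' then (i : Int) else maxDot l i

-- the global slot corresponding to a v-segment slot sv in u ++ '#' :: v
def relSlot (u : List Char) (sv : Int) : Int :=
  if 0 ≤ sv then (u.length : Int) + 1 + sv else maxDot u u.length

-- list-level results of the two ports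
def AL (l : List Char) : List Char :=
  (pushGo l (find_free_slot_east l ((l.length : Int) - 1)) l.length).1

def consHead (p : List Char) : List (List Char) → List (List Char)
  | [] => [p]
  | s :: ss => (p ++ s) :: ss

def mySplit : List Char → List (List Char)
  | [] => [[]]
  | c :: t => if c = '#' then [] :: mySplit t else consHead [c] (mySplit t)

def BL (l : List Char) : List Char :=
  PySem.Chars.join ['#'] ((mySplit l).map packSeg)

-- mask for packGo congruence: cells ('.'/'O') ↦ none, others kept
def maskc (c : Char) : Option Char := if c = '.' ∨ c = 'O' then none else some c
def mask (l : List Char) : List (Option Char) := l.map maskc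

-- ---------- find_free_slot_east ↔ maxDot ----------
lemma ffsGo_eq (l : List Char) : ∀ (i : Nat) (free : Int),
    ffsGo l free i = free - ((i : Int) - 1 - maxDot l i) := by
  intro i
  induction i with
  | zero => intro free; simp [ffsGo, maxDot]
  | succ i ih =>
      intro free
      simp only [ffsGo, maxDot, PySem.List.pyGet?_natCast]
      by_cases h : l[i]?.getD ' ' = '.'
      · simp [h]
      · simp only [h, if_false]; rw [ih]; push_cast; ring

lemma ffs_eq (l : List Char) (s : Int) (h : -1 ≤ s) :
    find_free_slot_east l s = maxDot l (s + 1).toNat := by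
  unfold find_free_slot_east
  rw [ffsGo_eq]
  have : ((s + 1).toNat : Int) = s + 1 := by omega
  rw [this]; ring

lemma maxDot_bounds (l : List Char) (i : Nat) : -1 ≤ maxDot l i ∧ maxDot l i < (i : Int) := by
  induction i with
  | zero => simp [maxDot]
  | succ i ih => simp only [maxDot]; split <;> [skip; skip] <;> push_cast <;> omega

lemma maxDot_dot (l : List Char) (i : Nat) (hi : i ≤ l.length) (h : 0 ≤ maxDot l i) :
    l[(maxDot l i).toNat]? = some '.' := by
  induction i with
  | zero => simp [maxDot] at h
  | succ i ih =>
      simp only [maxDot] at h ⊢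
      by_cases hc : l[i]?.getD ' ' = '.'
      · simp only [hc, if_true]
        have hlt : i < l.length := by omega
        have : l[i]? = some (l[i]?.getD ' ') := by
          simp [List.getElem?_eq_getElem hlt]
        simp only [Int.toNat_natCast]
        rw [this, hc]
      · simp only [hc, if_false] at h ⊢
        exact ih (by omega) h

lemma maxDot_max (l : List Char) (i : Nat) (q : Nat) (hq : q < i) (hd : l[q]? = some '.') :
    (q : Int) ≤ maxDot l i := by
  induction i with
  | zero => omega
  | succ i ih =>
      simp only [maxDot]
      by_cases hc : l[i]?.getD ' ' = '.'
      · simp only [hc, if_true]; omega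
      · simp only [hc, if_false]
        rcases Nat.lt_succ_iff_lt_or_eq.mp hq with h | h
        · exact ih h
        · subst h; rw [hd] at hc; simp at hc

lemma maxDot_prefix (a b : List Char) (i : Nat) (h : i ≤ a.length) :
    maxDot (a ++ b) i = maxDot a i := by
  induction i with
  | zero => simp [maxDot]
  | succ i ih =>
      have hi : i < a.length := by omega
      simp only [maxDot, List.getElem?_append_left hi]
      rw [ih (by omega)]

lemma maxDot_append_right (a b : List Char) (j : Nat) :
    maxDot (a ++ b) (a.length + j) =
      if maxDot b j < 0 then maxDot a a.length else (a.length : Int) + maxDot b j := by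
  induction j with
  | zero =>
      have hb := maxDot_bounds a a.length
      have h4 : ¬ ((-1 : Int) ≥ 0) := by omega
      simp [maxDot, maxDot_prefix a b a.length le_rfl]
  | succ j ih =>
      have hidx : (a ++ b)[a.length + j]? = b[j]? := by
        rw [List.getElem?_append_right (by omega)]; congr 1; omega
      rw [show a.length + (j+1) = (a.length + j) + 1 from rfl]
      simp only [maxDot, hidx]
      by_cases hc : b[j]?.getD ' ' = '.'
      · simp only [hc, if_true]
        have h3 : ¬ ((j:Int) < 0) := by omega
        simp only [h3, if_false]
        push_cast; ring
      · simp only [hc, if_false]; exact ih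

lemma maxDot_embed (u w : List Char) (j : Nat) :
    maxDot (u ++ '#' :: w) (u.length + 1 + j) = relSlot u (maxDot w j) := by
  have h1 : u.length + 1 + j = u.length + (j + 1) := by omega
  rw [h1, maxDot_append_right]
  have h2 : maxDot ('#' :: w) (j + 1) =
      if maxDot w j < 0 then -1 else maxDot w j + 1 := by
    induction j with
    | zero => simp [maxDot]
    | succ j ih =>
        specialize ih (by omega)
        have hidx : ('#' :: w)[j+1]? = w[j]? := by simp
        simp only [maxDot, hidx] at ih ⊢
        by_cases hc : w[j]?.getD ' ' = '.'
        · have h3 : ¬ ((j:Int) < 0) := by omega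
          simp only [hc, if_true, h3, if_false]
          push_cast; ring
        · simp only [hc, if_false]; exact ih
  rw [h2]
  unfold relSlot
  have := maxDot_bounds w j
  by_cases hneg : maxDot w j < 0
  · have h4 : ¬ (0 ≤ maxDot w j) := by omega
    simp [hneg, h4]
  · have h0 : 0 ≤ maxDot w j := by omega
    simp only [hneg, if_false, h0, if_true]
    have h5 : ¬ (maxDot w j + 1 < 0) := by omega
    simp only [h5, if_false]
    ring


-- ---------- pushGo basic facts ----------
lemma pushGo_slot_bounds (i : Nat) : ∀ (l : List Char) (s : Int), -1 ≤ s → s < l.length →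
    i ≤ l.length → -1 ≤ (pushGo l s i).2 ∧ (pushGo l s i).2 < l.length := by
  induction i with
  | zero => intro l s h1 h2 _; exact ⟨h1, h2⟩
  | succ i ih =>
      intro l s h1 h2 h3
      simp only [pushGo]
      split_ifs with hc1 hc2 hc3 hc4
      · exact ih l s h1 h2 (by omega)
      · exact ih l s h1 h2 (by omega)
      · -- O branch
        have hs0 : 0 ≤ s := by omega
        set row2 := PySem.List.pySetD (PySem.List.pySetD l s 'O') (i : Int) '.' with hrow2
        have hlen : row2.length = l.length := by
          simp [hrow2, PySem.List.length_pySetD]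
        have hff : find_free_slot_east row2 s = maxDot row2 (s+1).toNat :=
          ffs_eq row2 s (by omega)
        have hb := maxDot_bounds row2 (s+1).toNat
        have hbnd1 : -1 ≤ find_free_slot_east row2 s := by rw [hff]; omega
        have hbnd2 : find_free_slot_east row2 s < (row2.length : Int) := by
          rw [hff]; omega
        have := ih row2 (find_free_slot_east row2 s) hbnd1 (by omega) (by omega)
        rw [hlen] at this
        exact this
      · -- '#' branch
        have hff : find_free_slot_east l (i : Int) = maxDot l ((i:Int)+1).toNat :=
          ffs_eq l (i : Int) (by omega)
        have hb := maxDot_bounds l ((i:Int)+1).toNat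
        have h4 : (((i:Int)+1).toNat : Int) = (i:Int) + 1 := by omega
        exact ih l _ (by omega) (by omega) (by omega)
      · exact ih l s h1 h2 (by omega)

-- ---------- packGo / packSeg facts ----------
lemma packGo_congr_mask : ∀ (a b : List Char) (k : Int), mask a = mask b → packGo k a = packGo k b := by
  intro a
  induction a with
  | nil =>
      intro b k h
      have : b = [] := by simpa [mask] using h.symm
      subst this; rfl
  | cons c t ih =>
      intro b k h
      cases b with
      | nil => simp [mask] at h
      | cons d u =>
          simp only [mask, List.map_cons, List.cons.injEq] at h
          obtain ⟨h1, h2⟩ := h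
          simp only [packGo]
          by_cases hc : c = '.' ∨ c = 'O'
          · have hd : d = '.' ∨ d = 'O' := by
              by_contra hd
              simp [maskc, hc, hd] at h1
            simp only [hc, if_true, hd, if_true]
            by_cases hk : 0 < k
            · simp [hk, ih u (k-1) h2]
            · simp [hk, ih u k h2]
          · have hd : ¬ (d = '.' ∨ d = 'O') := by
              by_contra hd
              simp [maskc, hc, hd] at h1
            have hcd : c = d := by simpa [maskc, hc, hd] using h1
            simp only [hd, if_false, hcd, ih u k h2]

lemma packGo_zero : ∀ (l : List Char), l.count 'O' = 0 → packGo 0 l = l := by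
  intro l
  induction l with
  | nil => intro _; rfl
  | cons c t ih =>
      intro h
      rw [List.count_cons] at h
      have hc : ¬ c = 'O' := by by_contra hc; simp [hc] at h
      have ht : t.count 'O' = 0 := by omega
      simp only [packGo]
      by_cases hcell : c = '.' ∨ c = 'O'
      · have hc' : c = '.' := by tauto
        simp [hc', ih ht]
      · simp [hcell, ih ht]

lemma packGo_clean : ∀ (r : List Char),
    (∀ i j : Nat, i < j → r[i]? = some '.' → r[j]? ≠ some 'O') →
    packGo ((r.count 'O' : Int)) r = r := by
  intro r
  induction r with
  | nil => intro _; rfl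
  | cons c t ih =>
      intro hc
      have hct : ∀ i j : Nat, i < j → t[i]? = some '.' → t[j]? ≠ some 'O' := by
        intro i j hij hi
        exact hc (i+1) (j+1) (by omega) (by simpa using hi)
      by_cases hO : c = 'O'
      · subst hO
        have hk : ('O' :: t).count 'O' = t.count 'O' + 1 := by simp
        rw [hk]
        simp only [packGo]
        rw [if_pos (by norm_num), if_pos (by push_cast; omega)]
        have h2 : ((t.count 'O' + 1 : Nat) : Int) - 1 = ((t.count 'O' : Nat) : Int) := by
          push_cast; ring
        rw [h2, ih hct]
      · by_cases hdot : c = '.'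
        · subst hdot
          have htO : t.count 'O' = 0 := by
            by_contra hOc
            have hmem : 'O' ∈ t := by rw [← List.count_pos_iff]; omega
            obtain ⟨j, hj, hjel⟩ := List.mem_iff_getElem.mp hmem
            exact hc 0 (j+1) (by omega) (by simp)
              (by simp [List.getElem?_eq_getElem hj, hjel])
          have hk : ('.' :: t).count 'O' = 0 := by simp [htO]
          rw [hk]
          simp only [packGo]
          rw [if_pos (by norm_num), if_neg (by norm_num)]
          norm_num
          exact packGo_zero t htO
        · have hk : (c :: t).count 'O' = t.count 'O' := by simp [hO]
          rw [hk]
          simp only [packGo]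
          rw [if_neg (by tauto), ih hct]

lemma count_chars_eq (l : List Char) : PySem.Chars.count l ['O'] = l.count 'O' := by
  have go : ∀ (fuel : Nat) (t : List Char) (acc : Nat), t.length ≤ fuel →
      PySem.Chars.count.go ['O'] fuel t acc = acc + t.count 'O' := by
    intro fuel
    induction fuel with
    | zero =>
        intro t acc h
        have : t = [] := by cases t <;> simp_all
        subst this
        simp [PySem.Chars.count.go]
    | succ fuel ih =>
        intro t acc h
        cases t with
        | nil => simp [PySem.Chars.count.go]
        | cons c u =>
            rw [PySem.Chars.count.go]
            simp only [List.isPrefixOf, List.count_cons]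
            by_cases hc : c = 'O'
            · simp only [hc]
              norm_num
              rw [ih u (acc+1) (by simpa using h)]
              omega
            · have : ('O' == c) = false := by simp [Ne.symm hc]
              simp only [this]
              norm_num
              rw [ih u acc (by simpa using h)]
              simp [hc]
  unfold PySem.Chars.count
  simp only [List.isEmpty]
  norm_num
  rw [go l.length l 0 le_rfl]
  omega

lemma count_set_aux : ∀ (l : List Char) (n : Nat) (c d e : Char), l[n]? = some d →
    l.count e + (if c = e then 1 else 0) = (l.set n c).count e + (if d = e then 1 else 0) := by
  intro l
  induction l with
  | nil => intro n c d e h; simp at h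
  | cons a t ih =>
      intro n c d e h
      cases n with
      | zero =>
          simp only [List.getElem?_cons_zero, Option.some.injEq] at h
          subst h
          simp [List.count_cons]
          split_ifs <;> omega
      | succ n =>
          simp only [List.getElem?_cons_succ] at h
          simp only [List.set_cons_succ, List.count_cons]
          have := ih n c d e h
          split_ifs at this ⊢ <;> omega

lemma set_self_of_getElem? {α : Type} (l : List α) (n : Nat) (a : α) (h : l[n]? = some a) :
    l.set n a = l := by
  apply List.ext_getElem?
  intro i
  by_cases hi : i = n
  · subst hi; rw [List.getElem?_set_self', h]; rfl
  · rw [List.getElem?_set_ne (Ne.symm hi)]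

lemma packfix (l : List Char) (s : Int)
    (ha : ∀ q : Nat, l[q]? = some '.' → (q : Int) ≤ s)
    (hd : ∀ p : Nat, (p : Int) ≤ s → l[p]? ≠ some 'O') :
    packSeg l = l := by
  unfold packSeg
  rw [count_chars_eq]
  have hcnt : l.count 'O' = l.reverse.count 'O' := List.count_reverse.symm
  rw [hcnt, packGo_clean l.reverse ?_, List.reverse_reverse]
  intro i j hij hi hj
  have hjlen : j < l.reverse.length := (List.getElem?_eq_some_iff.mp hj).1
  have hilen : i < l.reverse.length := (List.getElem?_eq_some_iff.mp hi).1
  rw [List.getElem?_reverse (by simpa using hilen)] at hi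
  rw [List.getElem?_reverse (by simpa using hjlen)] at hj
  simp only [List.length_reverse] at hi hj hilen hjlen
  have h1 := ha _ hi
  have h2 := hd (l.length - 1 - j) (by omega)
  exact h2 hj

lemma swap_pack (l : List Char) (x s : Nat) (hx : l[x]? = some 'O') (hs : l[s]? = some '.')
    (hne : x ≠ s) : packSeg ((l.set s 'O').set x '.') = packSeg l := by
  have hxlen : x < l.length := (List.getElem?_eq_some_iff.mp hx).1
  have hslen : s < l.length := (List.getElem?_eq_some_iff.mp hs).1
  have hmx : (l.set s 'O')[x]? = some 'O' := by
    rw [List.getElem?_set_ne (Ne.symm hne)]; exact hx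
  -- counts agree
  have c1 := count_set_aux l s 'O' '.' 'O' hs
  have c2 := count_set_aux (l.set s 'O') x '.' 'O' 'O' hmx
  norm_num at c1 c2
  have hcnt : ((l.set s 'O').set x '.').count 'O' = l.count 'O' := by omega
  -- masks agree
  have hmask : mask ((l.set s 'O').set x '.') = mask l := by
    unfold mask
    rw [List.map_set, List.map_set]
    have e1 : maskc '.' = none := rfl
    have e2 : maskc 'O' = none := rfl
    rw [e1, e2]
    have g1 : (l.map maskc)[s]? = some none := by
      rw [List.getElem?_map, hs]; rfl
    rw [set_self_of_getElem? _ _ _ g1]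
    have g2 : (l.map maskc)[x]? = some none := by
      rw [List.getElem?_map, hx]; rfl
    rw [set_self_of_getElem? _ _ _ g2]
  unfold packSeg
  rw [count_chars_eq, count_chars_eq, hcnt]
  congr 1
  apply packGo_congr_mask
  unfold mask
  rw [List.map_reverse, List.map_reverse]
  show (mask _).reverse = (mask _).reverse
  rw [hmask]

-- ---------- the no-'#' core ----------
lemma core : ∀ (i : Nat) (l : List Char) (s : Int), '#' ∉ l → i ≤ l.length → -1 ≤ s →
    s < (l.length : Int) →
    (0 ≤ s → l[s.toNat]? = some '.') →
    (∀ q : Nat, l[q]? = some '.' → (q : Int) ≤ s) →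
    (∀ p : Nat, i ≤ p → (p : Int) ≤ s → l[p]? ≠ some 'O') →
    (pushGo l s i).1 = packSeg l := by
  intro i
  induction i with
  | zero =>
      intro l s _ _ _ _ _ ha hd
      exact (packfix l s ha (fun p hp => hd p (Nat.zero_le p) hp)).symm
  | succ i ih =>
      intro l s hns h1 h2 h3 hdot ha hd
      have hil : i < l.length := by omega
      obtain ⟨c, hc⟩ : ∃ c, l[i]? = some c := by
        rw [List.getElem?_eq_getElem hil]; exact ⟨_, rfl⟩
      have hget : (PySem.List.pyGet? l ((i : Nat) : Int)).getD ' ' = c := by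
        simp [hc]
      rw [pushGo]
      by_cases hskip : (i : Int) > s
      · rw [if_pos hskip]
        refine ih l s hns (by omega) h2 h3 hdot ha ?_
        intro p hp hps
        rcases Nat.eq_or_lt_of_le hp with h | h
        · omega
        · exact hd p (by omega) hps
      · rw [if_neg hskip]
        have hs0 : 0 ≤ s := by omega
        have hsl : l[s.toNat]? = some '.' := hdot hs0
        by_cases hcdot : c = '.'
        · rw [if_pos (by rw [hget, hcdot])]
          refine ih l s hns (by omega) h2 h3 hdot ha ?_
          intro p hp hps
          rcases Nat.eq_or_lt_of_le hp with h | h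
          · rw [← h, hc]; subst hcdot; simp
          · exact hd p (by omega) hps
        · by_cases hcO : c = 'O'
          · rw [if_neg (by rw [hget]; exact hcdot)]
            rw [if_pos (by rw [hget, hcO])]
            have hne : i ≠ s.toNat := by
              intro hh; rw [hh, hsl] at hc; rw [hcO] at hc; simp at hc
            have hlt : (i : Int) < s := by omega
            have e1 : PySem.List.pySetD (PySem.List.pySetD l s 'O') ((i : Nat) : Int) '.' =
                (l.set s.toNat 'O').set i '.' := by
              rw [PySem.List.pySetD_of_nonneg _ _ hs0]
              simp
            rw [e1]
            set l2 := (l.set s.toNat 'O').set i '.' with hl2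
            have hlen2 : l2.length = l.length := by simp [hl2]
            have g_i : l2[i]? = some '.' := by
              rw [hl2, List.getElem?_set_self']
              rw [List.getElem?_set_ne (Ne.symm hne), hc]
              rfl
            have g_s : l2[s.toNat]? = some 'O' := by
              rw [hl2, List.getElem?_set_ne hne, List.getElem?_set_self', hsl]
              rfl
            have g_other : ∀ q : Nat, q ≠ i → q ≠ s.toNat → l2[q]? = l[q]? := by
              intro q hq1 hq2
              rw [hl2, List.getElem?_set_ne (Ne.symm hq1), List.getElem?_set_ne (Ne.symm hq2)]
            have hff : find_free_slot_east l2 s = maxDot l2 (s + 1).toNat := ffs_eq _ _ (by omega)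
            have hb2 := maxDot_bounds l2 (s + 1).toNat
            have hs2i : (i : Int) ≤ maxDot l2 (s + 1).toNat :=
              maxDot_max l2 _ i (by omega) g_i
            have hs2lt : maxDot l2 (s + 1).toNat < s := by
              rcases lt_or_eq_of_le (show maxDot l2 (s + 1).toNat ≤ s by omega) with h | h
              · exact h
              · exfalso
                have hdd := maxDot_dot l2 (s + 1).toNat (by omega) (by omega)
                rw [h] at hdd
                rw [g_s] at hdd
                simp at hdd
            have hnohash : '#' ∉ l2 := by
              intro hmem
              rcases List.mem_or_eq_of_mem_set hmem with hmem2 | hh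
              · rcases List.mem_or_eq_of_mem_set hmem2 with hmem3 | hh
                · exact hns hmem3
                · simp at hh
              · simp at hh
            have hdot2 : 0 ≤ maxDot l2 (s + 1).toNat →
                l2[(maxDot l2 (s + 1).toNat).toNat]? = some '.' := by
              intro h0
              exact maxDot_dot l2 _ (by omega) h0
            have ha2 : ∀ q : Nat, l2[q]? = some '.' → (q : Int) ≤ maxDot l2 (s + 1).toNat := by
              intro q hq
              by_cases hqi : q = i
              · subst hqi; exact hs2i
              · by_cases hqs : q = s.toNat
                · subst hqs; rw [g_s] at hq; simp at hq
                · have := ha q (by rw [← g_other q hqi hqs]; exact hq)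
                  exact maxDot_max l2 _ q (by omega) hq
            have hd2 : ∀ p : Nat, i ≤ p → (p : Int) ≤ maxDot l2 (s + 1).toNat →
                l2[p]? ≠ some 'O' := by
              intro p hp hps
              by_cases hpi : p = i
              · subst hpi; rw [g_i]; simp
              · have hpgt : i + 1 ≤ p := by omega
                have hpns : p ≠ s.toNat := by omega
                rw [g_other p hpi hpns]
                exact hd p hpgt (by omega)
            rw [hff]
            have := ih l2 (maxDot l2 (s + 1).toNat) hnohash (by omega) (by omega)
              (by rw [hlen2]; omega) hdot2 ha2 hd2
            rw [this]
            exact swap_pack l i s.toNat (by rw [hc, hcO]) hsl hne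
          · rw [if_neg (by rw [hget]; exact hcdot), if_neg (by rw [hget]; exact hcO)]
            have hcH : ¬ c = '#' := by
              intro hh; subst hh; exact hns (List.mem_of_getElem? hc)
            rw [if_neg (by rw [hget]; exact hcH)]
            refine ih l s hns (by omega) h2 h3 hdot ha ?_
            intro p hp hps
            rcases Nat.eq_or_lt_of_le hp with h | h
            · rw [← h, hc]; intro hh; exact hcO (by injection hh)
            · exact hd p (by omega) hps

-- ---------- split / join ----------
lemma consHead_consHead (p q : List Char) (m : List (List Char)) :
    consHead p (consHead q m) = consHead (p ++ q) m := by
  cases m with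
  | nil => simp [consHead]
  | cons s ss => simp [consHead]

lemma mySplit_ne_nil (l : List Char) : mySplit l ≠ [] := by
  induction l with
  | nil => simp [mySplit]
  | cons c t ih =>
      simp only [mySplit]
      split
      · simp
      · cases h : mySplit t with
        | nil => exact absurd h ih
        | cons s ss => simp [consHead]

lemma goSplit : ∀ (fuel : Nat) (l cur : List Char) (acc : List (List Char)), l.length ≤ fuel →
    PySem.Chars.splitOn.go ['#'] fuel l cur acc =
      acc.reverse ++ consHead cur.reverse (mySplit l) := by
  intro fuel
  induction fuel with
  | zero =>
      intro l cur acc h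
      have hl : l = [] := by cases l <;> simp_all
      subst hl
      rw [PySem.Chars.splitOn.go]
      simp [mySplit, consHead]
  | succ fuel ih =>
      intro l cur acc h
      cases l with
      | nil =>
          rw [PySem.Chars.splitOn.go]
          · simp [mySplit, consHead]
          · omega
      | cons c rest =>
          rw [PySem.Chars.splitOn.go]
          simp only [List.isPrefixOf, Bool.and_true]
          by_cases hc : c = '#'
          · rw [if_pos (by simp [hc])]
            rw [ih _ _ _ (by simpa using h)]
            simp only [mySplit, hc, if_true, consHead, List.reverse_cons]
            cases hm : mySplit rest with
            | nil => exact absurd hm (mySplit_ne_nil rest)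
            | cons s ss => simp [hm]
          · rw [if_neg (by simp only [beq_iff_eq]; exact fun hh => hc hh.symm)]
            rw [ih _ _ _ (by simpa using h)]
            simp only [mySplit, if_neg hc, consHead_consHead, List.reverse_cons]
  

lemma splitOn_eq (l : List Char) : PySem.Chars.splitOn l ['#'] = mySplit l := by
  unfold PySem.Chars.splitOn
  rw [goSplit _ _ _ _ (by omega)]
  cases h : mySplit l with
  | nil => exact absurd h (mySplit_ne_nil l)
  | cons s ss => simp [consHead]

lemma mySplit_no_sep (l : List Char) (h : '#' ∉ l) : mySplit l = [l] := by
  induction l with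
  | nil => rfl
  | cons c t ih =>
      simp only [List.mem_cons, not_or] at h
      simp only [mySplit, if_neg (by simpa [eq_comm] using h.1)]
      rw [ih h.2]
      simp [consHead]

lemma mySplit_append (u v : List Char) (h : '#' ∉ u) :
    mySplit (u ++ '#' :: v) = u :: mySplit v := by
  induction u with
  | nil => simp [mySplit]
  | cons c u' ih =>
      simp only [List.mem_cons, not_or] at h
      simp only [List.cons_append, mySplit, if_neg (by simpa [eq_comm] using h.1)]
      rw [ih h.2]
      simp [consHead]

lemma BL_no_sep (l : List Char) (h : '#' ∉ l) : BL l = packSeg l := by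
  unfold BL
  rw [mySplit_no_sep l h]
  simp [PySem.Chars.join, List.intercalate]

lemma BL_append (u v : List Char) (h : '#' ∉ u) : BL (u ++ '#' :: v) = BL u ++ '#' :: BL v := by
  unfold BL
  rw [mySplit_append u v h, mySplit_no_sep u h]
  simp only [List.map_cons]
  cases hm : (mySplit v).map packSeg with
  | nil => exact absurd (by simpa using hm) (mySplit_ne_nil v)
  | cons s ss =>
      rw [PySem.Chars.join_cons_cons]
      simp [PySem.Chars.join, List.intercalate]

-- ---------- locality of the A loop ----------
lemma frame : ∀ (i : Nat) (u w : List Char) (s : Int), i ≤ u.length → -1 ≤ s →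
    s < (u.length : Int) →
    pushGo (u ++ w) s i = ((pushGo u s i).1 ++ w, (pushGo u s i).2) := by
  intro i
  induction i with
  | zero => intro u w s _ _ _; rfl
  | succ i ih =>
      intro u w s h1 h2 h3
      have hiu : i < u.length := by omega
      have hget : PySem.List.pyGet? (u ++ w) (i : Int) = PySem.List.pyGet? u (i : Int) := by
        simp [List.getElem?_append_left hiu]
      simp only [pushGo, hget]
      by_cases hc1 : (i : Int) > s
      · rw [if_pos hc1, if_pos hc1, ih u w s (by omega) h2 h3]
      · rw [if_neg hc1, if_neg hc1]
        by_cases hc2 : (PySem.List.pyGet? u (i : Int)).getD ' ' = '.'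
        · rw [if_pos hc2, if_pos hc2, ih u w s (by omega) h2 h3]
        · rw [if_neg hc2, if_neg hc2]
          by_cases hc3 : (PySem.List.pyGet? u (i : Int)).getD ' ' = 'O'
          · rw [if_pos hc3, if_pos hc3]
            have hs0 : 0 ≤ s := by omega
            have hstn : s.toNat < u.length := by omega
            have e1 : PySem.List.pySetD (PySem.List.pySetD (u ++ w) s 'O') (i : Int) '.' =
                (PySem.List.pySetD (PySem.List.pySetD u s 'O') (i : Int) '.') ++ w := by
              rw [PySem.List.pySetD_of_nonneg _ _ hs0, PySem.List.pySetD_of_nonneg _ _ hs0]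
              rw [List.set_append_left _ _ hstn]
              simp only [PySem.List.pySetD_natCast]
              rw [List.set_append_left _ _ (by simpa using hiu)]
            rw [e1]
            set u2 := PySem.List.pySetD (PySem.List.pySetD u s 'O') (i : Int) '.' with hu2
            have hlen2 : u2.length = u.length := by
              simp [hu2, PySem.List.length_pySetD]
            have e2 : find_free_slot_east (u2 ++ w) s = find_free_slot_east u2 s := by
              rw [ffs_eq _ _ (by omega), ffs_eq _ _ (by omega)]
              exact maxDot_prefix u2 w _ (by omega)
            rw [e2]
            have hb := maxDot_bounds u2 (s + 1).toNat
            have hff : find_free_slot_east u2 s = maxDot u2 (s + 1).toNat := ffs_eq _ _ (by omega)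
            exact ih u2 w _ (by omega) (by rw [hff]; omega) (by rw [hff, hlen2]; omega)
          · rw [if_neg hc3, if_neg hc3]
            by_cases hc4 : (PySem.List.pyGet? u (i : Int)).getD ' ' = '#'
            · rw [if_pos hc4, if_pos hc4]
              have e3 : find_free_slot_east (u ++ w) (i : Int) = find_free_slot_east u (i : Int) := by
                rw [ffs_eq _ _ (by omega), ffs_eq _ _ (by omega)]
                exact maxDot_prefix u w _ (by omega)
              rw [e3]
              have hb := maxDot_bounds u ((i : Int) + 1).toNat
              have hff : find_free_slot_east u (i : Int) = maxDot u ((i : Int) + 1).toNat :=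
                ffs_eq _ _ (by omega)
              exact ih u w _ (by omega) (by rw [hff]; omega) (by rw [hff]; omega)
            · rw [if_neg hc4, if_neg hc4, ih u w s (by omega) h2 h3]

lemma hash_step (u w : List Char) (sw : Int) :
    pushGo (u ++ '#' :: w) (relSlot u sw) (u.length + 1) =
      pushGo (u ++ '#' :: w) (maxDot u u.length) u.length := by
  have hget : (PySem.List.pyGet? (u ++ '#' :: w) (u.length : Int)).getD ' ' = '#' := by
    have h9 : (u ++ '#' :: w)[u.length]? = some '#' := by
      rw [List.getElem?_append_right le_rfl]; simp
    simp only [PySem.List.pyGet?_natCast, h9, Option.getD_some]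
  by_cases hsw : 0 ≤ sw
  · have hrel : relSlot u sw = (u.length : Int) + 1 + sw := by simp [relSlot, hsw]
    have hnotskip : ¬ ((u.length : Int) > relSlot u sw) := by rw [hrel]; omega
    simp only [pushGo]
    rw [if_neg hnotskip, if_neg (by rw [hget]; decide), if_neg (by rw [hget]; decide),
      if_pos hget]
    congr 1
    rw [ffs_eq _ _ (by omega)]
    rw [show ((u.length : Int) + 1).toNat = u.length + 1 + 0 from by omega, maxDot_embed u w 0]
    simp [relSlot, maxDot]
  · have hrel : relSlot u sw = maxDot u u.length := by simp [relSlot, hsw]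
    have hb := maxDot_bounds u u.length
    have hskip : ((u.length : Int) > relSlot u sw) := by rw [hrel]; omega
    simp only [pushGo]
    rw [if_pos hskip, hrel]

lemma shift (u : List Char) : ∀ (i : Nat) (v : List Char) (sv : Int), i ≤ v.length → -1 ≤ sv →
    sv < (v.length : Int) →
    pushGo (u ++ '#' :: v) (relSlot u sv) (u.length + 1 + i) =
      pushGo (u ++ '#' :: (pushGo v sv i).1) (relSlot u (pushGo v sv i).2) (u.length + 1) := by
  intro i
  induction i with
  | zero => intro v sv _ _ _; rfl
  | succ i ih =>
      intro v sv h1 h2 h3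
      have hvi : i < v.length := by omega
      rw [show u.length + 1 + (i + 1) = (u.length + 1 + i) + 1 from by omega]
      have hgeq : PySem.List.pyGet? (u ++ '#' :: v) ((u.length + 1 + i : Nat) : Int) =
          PySem.List.pyGet? v ((i : Nat) : Int) := by
        simp only [PySem.List.pyGet?_natCast]
        rw [List.getElem?_append_right (by omega)]
        rw [show u.length + 1 + i - u.length = i + 1 from by omega]
        simp
      by_cases hsv : 0 ≤ sv
      · have hrel : relSlot u sv = (u.length : Int) + 1 + sv := by simp [relSlot, hsv]
        by_cases hskip : (i : Int) > sv
        · have hgskip : ((u.length + 1 + i : Nat) : Int) > relSlot u sv := by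
            rw [hrel]; push_cast; omega
          have hv : pushGo v sv (i + 1) = pushGo v sv i := by
            rw [pushGo, if_pos hskip]
          rw [hv]
          conv_lhs => rw [pushGo]
          rw [if_pos hgskip]
          exact ih v sv (by omega) h2 h3
        · have hgskip : ¬ ((u.length + 1 + i : Nat) : Int) > relSlot u sv := by
            rw [hrel]; push_cast; omega
          conv_lhs => rw [pushGo]
          rw [if_neg hgskip, hgeq]
          by_cases hc2 : (PySem.List.pyGet? v ((i : Nat) : Int)).getD ' ' = '.'
          · have hv : pushGo v sv (i + 1) = pushGo v sv i := by
              rw [pushGo, if_neg hskip, if_pos hc2]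
            rw [hv, if_pos hc2]
            exact ih v sv (by omega) h2 h3
          · rw [if_neg hc2]
            by_cases hc3 : (PySem.List.pyGet? v ((i : Nat) : Int)).getD ' ' = 'O'
            · have hv : pushGo v sv (i + 1) =
                  pushGo (PySem.List.pySetD (PySem.List.pySetD v sv 'O') ((i : Nat) : Int) '.')
                    (find_free_slot_east
                      (PySem.List.pySetD (PySem.List.pySetD v sv 'O') ((i : Nat) : Int) '.') sv) i := by
                rw [pushGo, if_neg hskip, if_neg hc2, if_pos hc3]
              rw [hv, if_pos hc3]
              have e1 : PySem.List.pySetD (PySem.List.pySetD (u ++ '#' :: v) (relSlot u sv) 'O')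
                    ((u.length + 1 + i : Nat) : Int) '.' =
                  u ++ '#' :: (PySem.List.pySetD (PySem.List.pySetD v sv 'O') ((i : Nat) : Int) '.') := by
                rw [hrel]
                have s1 : PySem.List.pySetD (u ++ '#' :: v) ((u.length : Int) + 1 + sv) 'O' =
                    u ++ '#' :: (v.set sv.toNat 'O') := by
                  rw [PySem.List.pySetD_of_nonneg _ _ (by omega)]
                  rw [show ((u.length : Int) + 1 + sv).toNat = u.length + (sv.toNat + 1) from by omega]
                  rw [List.set_append_right _ _ (by omega)]
                  rw [show u.length + (sv.toNat + 1) - u.length = sv.toNat + 1 from by omega]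
                  simp [List.set_cons_succ]
                rw [s1, PySem.List.pySetD_of_nonneg _ _ hsv]
                simp only [PySem.List.pySetD_natCast]
                rw [List.set_append_right _ _ (by omega)]
                rw [show u.length + 1 + i - u.length = i + 1 from by omega]
                simp [List.set_cons_succ]
              rw [e1]
              set v2 := PySem.List.pySetD (PySem.List.pySetD v sv 'O') ((i : Nat) : Int) '.' with hv2
              have hlen2 : v2.length = v.length := by
                simp [hv2, PySem.List.length_pySetD]
              have e2 : find_free_slot_east (u ++ '#' :: v2) (relSlot u sv) =
                  relSlot u (find_free_slot_east v2 sv) := by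
                rw [hrel, ffs_eq _ _ (by omega), ffs_eq _ _ (by omega)]
                rw [show (((u.length : Int) + 1 + sv) + 1).toNat = u.length + 1 + (sv + 1).toNat from by omega]
                exact maxDot_embed u v2 (sv + 1).toNat
              rw [e2]
              have hb := maxDot_bounds v2 (sv + 1).toNat
              have hff : find_free_slot_east v2 sv = maxDot v2 (sv + 1).toNat := ffs_eq _ _ (by omega)
              exact ih v2 _ (by omega) (by rw [hff]; omega) (by rw [hff, hlen2]; omega)
            · rw [if_neg hc3]
              by_cases hc4 : (PySem.List.pyGet? v ((i : Nat) : Int)).getD ' ' = '#'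
              · have hv : pushGo v sv (i + 1) =
                    pushGo v (find_free_slot_east v ((i : Nat) : Int)) i := by
                  rw [pushGo, if_neg hskip, if_neg hc2, if_neg hc3, if_pos hc4]
                rw [hv, if_pos hc4]
                have e3 : find_free_slot_east (u ++ '#' :: v) ((u.length + 1 + i : Nat) : Int) =
                    relSlot u (find_free_slot_east v ((i : Nat) : Int)) := by
                  rw [ffs_eq _ _ (by omega), ffs_eq _ _ (by omega)]
                  rw [show (((u.length + 1 + i : Nat) : Int) + 1).toNat = u.length + 1 + ((i : Int) + 1).toNat from by omega]
                  exact maxDot_embed u v ((i : Int) + 1).toNat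
                rw [e3]
                have hb := maxDot_bounds v ((i : Int) + 1).toNat
                have hff : find_free_slot_east v ((i : Nat) : Int) = maxDot v ((i : Int) + 1).toNat :=
                  ffs_eq _ _ (by omega)
                exact ih v _ (by omega) (by rw [hff]; omega) (by rw [hff]; omega)
              · have hv : pushGo v sv (i + 1) = pushGo v sv i := by
                  rw [pushGo, if_neg hskip, if_neg hc2, if_neg hc3, if_neg hc4]
                rw [hv, if_neg hc4]
                exact ih v sv (by omega) h2 h3
      · have hrel : relSlot u sv = maxDot u u.length := by simp [relSlot, hsv]
        have hb := maxDot_bounds u u.length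
        have hgskip : ((u.length + 1 + i : Nat) : Int) > relSlot u sv := by
          rw [hrel]; push_cast; omega
        have hv : pushGo v sv (i + 1) = pushGo v sv i := by
          rw [pushGo, if_pos (by omega : (i : Int) > sv)]
        rw [hv]
        conv_lhs => rw [pushGo]
        rw [if_pos hgskip]
        exact ih v sv (by omega) h2 h3

-- ---------- main ----------
lemma AL_eq_BL : ∀ (l : List Char), AL l = BL l := by
  intro l
  induction hn : l.length using Nat.strong_induction_on generalizing l with
  | _ n ih =>
  subst hn
  by_cases hmem : '#' ∈ l
  · -- split at the first '#'
    have hne : l ≠ [] := by intro hh; subst hh; simp at hmem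
    set u := List.takeWhile (fun c => c != '#') l with hu
    set r := List.dropWhile (fun c => c != '#') l with hr
    have hnu : '#' ∉ u := by
      intro hh
      have := List.mem_takeWhile_imp hh
      simp at this
    have hsplit : u ++ r = l := List.takeWhile_append_dropWhile
    have hrne : r ≠ [] := by
      intro hh
      rw [hh, List.append_nil] at hsplit
      rw [← hsplit] at hmem
      exact hnu hmem
    have hhead : r.head hrne = '#' := by
      have := List.head_dropWhile_not (p := fun c => c != '#') (l := l) hrne
      simpa [hr] using this
    set v := r.tail with hv
    have hl : l = u ++ '#' :: v := by
      rw [← hsplit]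
      congr 1
      rw [hv, ← hhead]
      exact (List.cons_head_tail hrne).symm
    have hlen : l.length = u.length + 1 + v.length := by rw [hl]; simp; omega
    have hbu := maxDot_bounds u u.length
    have hbv := maxDot_bounds v v.length
    -- the initial slot
    have hffs0 : find_free_slot_east l ((l.length : Int) - 1) = relSlot u (maxDot v v.length) := by
      rw [ffs_eq _ _ (by have := List.length_pos_iff_ne_nil.mpr hne; omega)]
      rw [show ((l.length : Int) - 1 + 1).toNat = u.length + 1 + v.length from by omega]
      rw [hl]
      exact maxDot_embed u v v.length
    -- run the three phases
    have hAL : AL l = AL u ++ '#' :: AL v := by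
      unfold AL
      rw [hffs0]
      conv_lhs => rw [hl]
      rw [show (u ++ '#' :: v).length = u.length + 1 + v.length from by simp; omega]
      rw [shift u v.length v (maxDot v v.length) le_rfl (by omega) (by omega)]
      have hsb := pushGo_slot_bounds v.length v (maxDot v v.length) (by omega) (by omega) le_rfl
      rw [hash_step u _ _]
      rw [frame u.length u ('#' :: (pushGo v (maxDot v v.length) v.length).1)
        (maxDot u u.length) le_rfl (by omega) (by omega)]
      have hffu : find_free_slot_east u ((u.length : Int) - 1) = maxDot u u.length := by
        rw [ffs_eq _ _ (by omega)]
        congr 1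
        omega
      have hffv : find_free_slot_east v ((v.length : Int) - 1) = maxDot v v.length := by
        rw [ffs_eq _ _ (by omega)]
        congr 1
        omega
      rw [hffu, hffv]
    rw [hAL, hl]
    rw [BL_append u v hnu]
    rw [ih u.length (by omega) u rfl, ih v.length (by omega) v rfl]
  · -- no '#' at all: the core lemma
    have hb := maxDot_bounds l l.length
    have hffs : find_free_slot_east l ((l.length : Int) - 1) = maxDot l l.length := by
      rw [ffs_eq _ _ (by omega)]
      congr 1
      omega
    unfold AL
    rw [hffs]
    rw [core l.length l (maxDot l l.length) hmem le_rfl (by omega) (by omega)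
      (fun h0 => maxDot_dot l l.length le_rfl h0)
      (fun q hq => maxDot_max l l.length q (List.getElem?_eq_some_iff.mp hq).1 hq)
      (fun p hp hps => by
        rw [List.getElem?_eq_none (by omega)]
        simp)]
    rw [BL_no_sep l hmem]

-- ===== VERDICT (by name: the statement is the Claim_ definition above) =====
theorem push_east_spec : Claim_equal_push_east := by
  intro row _
  unfold Spec_push_east
  show push_east row = push_east_alt row
  have h := AL_eq_BL row.toList
  simp only [push_east, push_east_alt, AL, BL, splitOn_eq] at *
  rw [h]
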